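-- pv_equiv track=rewrite | github.com/DragunWF/Competitive-Programming | CodeWars/python/7_kyu/table_tennis_who_is_serving.py | who_is_serving
-- ===== SOURCE A (Python) =====
-- def who_is_serving(current_round: int) -> int:
--     current_player = 1
--     rounds_left_for_player = 2
--     round = 1
--     while round < current_round:
--         round += 1
--         rounds_left_for_player -= 1
--         if rounds_left_for_player == 0:
--             current_player = 2 if current_player == 1 else 1
--             rounds_left_for_player = 2
--     return current_player
-- ===== SOURCE B (Python) =====
-- def who_is_serving(current_round: int) -> int:
--     # rounds completed before the current one (never negative)
--     k = max(current_round - 1, 0)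
--     # the server flips after every 2 rounds
--     return 1 + (k // 2) % 2
-- ===== Notes on version B (the rewrite author's own statement) =====
-- stated objective: faster
-- what changed: Replaces the round-by-round simulation loop with a closed-form arithmetic formula that computes the serving player directly from the round number.
import Mathlib
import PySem

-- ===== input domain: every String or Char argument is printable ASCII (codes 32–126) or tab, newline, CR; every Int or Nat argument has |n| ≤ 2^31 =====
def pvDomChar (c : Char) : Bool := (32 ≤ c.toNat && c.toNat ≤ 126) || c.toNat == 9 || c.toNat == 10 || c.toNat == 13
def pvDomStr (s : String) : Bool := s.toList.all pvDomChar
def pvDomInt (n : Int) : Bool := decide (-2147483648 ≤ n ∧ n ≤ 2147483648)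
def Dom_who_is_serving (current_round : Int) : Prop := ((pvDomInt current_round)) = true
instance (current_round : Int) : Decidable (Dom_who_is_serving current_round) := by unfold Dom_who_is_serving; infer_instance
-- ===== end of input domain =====

-- B replaces A's round-by-round simulation loop with a closed-form O(1) formula.


-- ===== PORT A =====
-- A's while loop runs exactly (current_round - 1).toNat iterations (round goes 1,2,…);
-- fuel counts the remaining iterations, state is (current_player, rounds_left_for_player).
def who_is_serving_loop : Nat → Int → Int → Int
  | 0, current_player, _ => current_player
  | fuel + 1, current_player, rounds_left_for_player =>
      let rounds_left_for_player := rounds_left_for_player - 1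
      if rounds_left_for_player = 0 then
        who_is_serving_loop fuel (if current_player = 1 then 2 else 1) 2
      else
        who_is_serving_loop fuel current_player rounds_left_for_player

def who_is_serving (current_round : Int) : Int :=
  who_is_serving_loop (current_round - 1).toNat 1 2

-- ===== PORT B =====
def who_is_serving_alt (current_round : Int) : Int :=
  1 + PySem.Int.mod (PySem.Int.floordiv (max (current_round - 1) 0) 2) 2

-- ===== PRECONDITION & SPEC =====
def Spec_who_is_serving (current_round : Int) (out : Int) : Prop := out = who_is_serving_alt current_round
instance (current_round : Int) (out : Int) : Decidable (Spec_who_is_serving current_round out) := by unfold Spec_who_is_serving; infer_instance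

-- ===== CLAIM (what is proved, stated in full; the proofs are below) =====
def Claim_equal_who_is_serving : Prop := ∀ (current_round : Int), Dom_who_is_serving current_round → Spec_who_is_serving current_round (who_is_serving current_round)

-- ===== LEMMAS AND PROOFS =====

-- A's loop from the initial state has period 4 in the fuel.
theorem who_is_serving_loop_period (n : Nat) :
    who_is_serving_loop (n + 4) 1 2 = who_is_serving_loop n 1 2 := by
  simp [who_is_serving_loop]

-- Closed form of A's loop from the initial state.
theorem who_is_serving_loop_closed (n : Nat) :
    who_is_serving_loop n 1 2 = 1 + ((n / 2 % 2 : Nat) : Int) := by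
  induction n using Nat.strong_induction_on with
  | _ n ih =>
    match n with
    | 0 => decide
    | 1 => decide
    | 2 => decide
    | 3 => decide
    | m + 4 =>
      rw [who_is_serving_loop_period, ih m (by omega)]
      congr 2
      omega

theorem who_is_serving_spec : Claim_equal_who_is_serving := by
  intro current_round _
  unfold Spec_who_is_serving who_is_serving who_is_serving_alt
  rw [who_is_serving_loop_closed]
  have hmax : max (current_round - 1) 0 = (((current_round - 1).toNat : Nat) : Int) := by omega
  rw [hmax]
  simp
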